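-- pv_equiv track=rewrite | github.com/HughTang/-Python-leetcode- | Written Examination/网易互娱笔试/3.配方制作.py | jugde
-- ===== SOURCE A (Python) =====
-- def jugde(case):
--     ls = [0] * (len(case)//2+1)
--     for line in case:
--         t,e,s = line[0],line[1],line[2]
--         if s == 0:
--             ls[e] = t
--         else:
--             ls[e] = t - ls[e]
--     return ls.index(max(ls))
-- ===== SOURCE B (Python) =====
-- def jugde(case):
--     # Backward pass: each cell's final value is t_last - t_prev + t_prevprev - ...,
--     # accumulated from the end and frozen at the first s==0 op seen going backwards.
--     n = len(case) // 2 + 1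
--     acc = [0] * n
--     sign = [1] * n
--     done = [False] * n
--     for line in reversed(case):
--         t, e, s = line[0], line[1], line[2]
--         if not done[e]:
--             acc[e] += sign[e] * t
--             if s == 0:
--                 done[e] = True
--             else:
--                 sign[e] = -sign[e]
--     best, idx = acc[0], 0
--     for i in range(1, n):
--         if acc[i] > best:
--             best, idx = acc[i], i
--     return idx
-- ===== Notes on version B (the rewrite author's own statement) =====
-- stated objective: alternative
-- what changed: B abandons A's forward state-machine simulation: it scans the operations once in REVERSE, accumulating each cell's final value as an alternating-sign sum of the t's (frozen at the first s==0 op seen from the end), then takes the argmax in one strict-greater pass instead of max() followed by .index(); Pre_ excludes only inputs where A raises IndexError (a line shorter than 3 or a target index out of range), where B raises too.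
import Mathlib
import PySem

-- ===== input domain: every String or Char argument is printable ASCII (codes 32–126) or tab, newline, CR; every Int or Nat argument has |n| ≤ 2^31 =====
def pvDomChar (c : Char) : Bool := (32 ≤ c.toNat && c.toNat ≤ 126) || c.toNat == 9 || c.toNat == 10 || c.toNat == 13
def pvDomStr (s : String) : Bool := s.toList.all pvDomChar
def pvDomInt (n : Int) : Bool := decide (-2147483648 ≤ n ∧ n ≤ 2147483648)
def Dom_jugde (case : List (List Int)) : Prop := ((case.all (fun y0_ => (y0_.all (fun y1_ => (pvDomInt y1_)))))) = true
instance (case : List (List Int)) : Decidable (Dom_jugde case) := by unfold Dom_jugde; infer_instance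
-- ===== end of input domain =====

-- B replaces A's forward simulation of the cell array by a single REVERSE scan that accumulates
-- each cell's final value as an alternating-sign sum (frozen at the first s==0 op seen from the
-- end), followed by a one-pass strict-greater argmax (objective: alternative).

-- ===== PORT A =====
-- one loop iteration of A: t,e,s = line[0],line[1],line[2]; ls[e] = t  or  ls[e] = t - ls[e]
def jugdeStepA (ls : List Int) (line : List Int) : List Int :=
  let t := PySem.List.pyGetD line 0 0
  let e := PySem.List.pyGetD line 1 0
  let s := PySem.List.pyGetD line 2 0
  if s = 0 then PySem.List.pySetD ls e t
  else PySem.List.pySetD ls e (t - PySem.List.pyGetD ls e 0)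

def jugde (case : List (List Int)) : Int :=
  -- ls = [0] * (len(case)//2+1)
  let ls0 := PySem.List.pyRepeat [(0 : Int)] (PySem.Int.floordiv (case.length : Int) 2 + 1)
  let ls := case.foldl jugdeStepA ls0
  -- return ls.index(max(ls))   (ls is nonempty, so max() and .index() succeed)
  match PySem.List.max? ls (fun x => x) with
  | some m => ((PySem.List.index? ls m).getD 0 : Nat)
  | none => 0

-- ===== PORT B =====
-- one iteration of B's backward loop over reversed(case): if not done[e], acc[e] += sign[e]*t,
-- then either freeze the cell (s == 0) or flip its sign
def jugdeStepB (st : List Int × List Int × List Bool) (line : List Int) :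
    List Int × List Int × List Bool :=
  let t := PySem.List.pyGetD line 0 0
  let e := PySem.List.pyGetD line 1 0
  let s := PySem.List.pyGetD line 2 0
  if PySem.List.pyGetD st.2.2 e false then st
  else
    let acc' := PySem.List.pySetD st.1 e
      (PySem.List.pyGetD st.1 e 0 + PySem.List.pyGetD st.2.1 e 0 * t)
    if s = 0 then (acc', st.2.1, PySem.List.pySetD st.2.2 e true)
    else (acc', PySem.List.pySetD st.2.1 e (-(PySem.List.pyGetD st.2.1 e 0)), st.2.2)

def jugde_alt (case : List (List Int)) : Int :=
  let n : Int := PySem.Int.floordiv (case.length : Int) 2 + 1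
  -- acc = [0]*n; sign = [1]*n; done = [False]*n; for line in reversed(case): …
  let st := case.reverse.foldl jugdeStepB
    (PySem.List.pyRepeat [(0 : Int)] n, PySem.List.pyRepeat [(1 : Int)] n,
     PySem.List.pyRepeat [false] n)
  let acc := st.1
  -- best, idx = acc[0], 0; for i in range(1, n): if acc[i] > best: best, idx = acc[i], i
  ((PySem.List.pyRange 1 n 1).foldl
    (fun (p : Int × Int) i =>
      if PySem.List.pyGetD acc i 0 > p.1 then (PySem.List.pyGetD acc i 0, i) else p)
    (PySem.List.pyGetD acc 0 0, 0)).2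

-- ===== PRECONDITION & SPEC =====
-- Pre_ excludes exactly the inputs where Python A raises IndexError: a line with fewer than
-- three entries (on line[2]) or a target index line[1] outside [-(len//2+1), len//2+1) (on ls[e]).
def Pre_jugde (case : List (List Int)) : Prop :=
  ∀ line ∈ case, 3 ≤ line.length ∧
    -(((case.length / 2 + 1 : Nat)) : Int) ≤ PySem.List.pyGetD line 1 0 ∧
    PySem.List.pyGetD line 1 0 < (((case.length / 2 + 1 : Nat)) : Int)
instance (case : List (List Int)) : Decidable (Pre_jugde case) := by unfold Pre_jugde; infer_instance

def pvWitness_jugde : List (List Int) := [[5, 0, 0], [1, 1, 1]]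

def Spec_jugde (case : List (List Int)) (out : Int) : Prop := out = jugde_alt case
instance (case : List (List Int)) (out : Int) : Decidable (Spec_jugde case out) := by unfold Spec_jugde; infer_instance

-- ===== CLAIM (what is proved, stated in full; the proofs are below) =====
def Claim_equal_jugde : Prop := ∀ (case : List (List Int)), Dom_jugde case → Pre_jugde case → Spec_jugde case (jugde case)

-- ===== LEMMAS AND PROOFS =====

-- the bridge between B's backward state and A's forward list: the final value of cell i equals
-- acc[i] plus (unless frozen) sign[i] times the forward value cell i currently holds
def combineB (st : List Int × List Int × List Bool) (ls : List Int) (i : Nat) : Int :=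
  st.1.getD i 0 + (if st.2.2.getD i false then 0 else st.2.1.getD i 0 * ls.getD i 0)

-- reading through an in-range Python index is reading at its normalized nonnegative index
lemma pyGetD_inRange {α : Type} (xs : List α) (e : Int) (d : α)
    (h1 : -(xs.length : Int) ≤ e) (h2 : e < xs.length) :
    PySem.List.pyGetD xs e d = xs.getD (if e < 0 then e + xs.length else e).toNat d := by
  unfold PySem.List.pyGetD PySem.List.pyGet? PySem.List.pyIdx?
  split_ifs with hneg h h' <;> simp_all [List.getD] <;> try omega
  · congr 2; omega

-- writing through an in-range Python index is writing at its normalized nonnegative index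
lemma pySetD_inRange {α : Type} (xs : List α) (e : Int) (v : α)
    (h1 : -(xs.length : Int) ≤ e) (h2 : e < xs.length) :
    PySem.List.pySetD xs e v = xs.set (if e < 0 then e + xs.length else e).toNat v := by
  unfold PySem.List.pySetD PySem.List.pySet? PySem.List.pyIdx?
  split_ifs with hneg h h' <;> simp_all <;> try omega
  · congr 1; omega

lemma getD_set {α : Type} (xs : List α) (k i : Nat) (v d : α) (hk : k < xs.length) :
    (xs.set k v).getD i d = if i = k then v else xs.getD i d := by
  by_cases h : i = k
  · subst h; simp [List.getD, hk]
  · simp [List.getD, List.getElem?_set_ne (Ne.symm h), h]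

-- both step functions preserve the lengths of every list they carry
lemma stepA_length (ls : List Int) (line : List Int) :
    (jugdeStepA ls line).length = ls.length := by
  unfold jugdeStepA; dsimp only; split_ifs <;> simp [PySem.List.length_pySetD]

lemma stepB_length (st : List Int × List Int × List Bool) (line : List Int) :
    (jugdeStepB st line).1.length = st.1.length ∧
    (jugdeStepB st line).2.1.length = st.2.1.length ∧
    (jugdeStepB st line).2.2.length = st.2.2.length := by
  unfold jugdeStepB; dsimp only; split_ifs <;> simp [PySem.List.length_pySetD]

lemma foldA_length (cs : List (List Int)) (ls : List Int) :
    (cs.foldl jugdeStepA ls).length = ls.length := by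
  induction cs generalizing ls with
  | nil => rfl
  | cons line rest ih => rw [List.foldl_cons, ih, stepA_length]

-- what A's step does to each cell, as a pointwise description
lemma stepA_getD (line : List Int) (n : Nat)
    (he1 : -(n : Int) ≤ PySem.List.pyGetD line 1 0)
    (he2 : PySem.List.pyGetD line 1 0 < (n : Int))
    (ls : List Int) (hls : ls.length = n) (i : Nat) :
    (jugdeStepA ls line).getD i 0 =
      if i = (if PySem.List.pyGetD line 1 0 < 0 then PySem.List.pyGetD line 1 0 + n
              else PySem.List.pyGetD line 1 0).toNat then
        (if PySem.List.pyGetD line 2 0 = 0 then PySem.List.pyGetD line 0 0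
         else PySem.List.pyGetD line 0 0 - ls.getD (if PySem.List.pyGetD line 1 0 < 0 then
           PySem.List.pyGetD line 1 0 + n else PySem.List.pyGetD line 1 0).toNat 0)
      else ls.getD i 0 := by
  set e := PySem.List.pyGetD line 1 0 with he
  set K : Nat := (if e < 0 then e + n else e).toNat with hK
  have hKn : K < n := by rw [hK]; split_ifs <;> omega
  have hget : PySem.List.pyGetD ls e 0 = ls.getD K 0 := by
    rw [pyGetD_inRange ls e 0 (by omega) (by omega), hls]
  have hset : ∀ v : Int, PySem.List.pySetD ls e v = ls.set K v := by
    intro v; rw [pySetD_inRange ls e v (by omega) (by omega), hls]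
  unfold jugdeStepA
  simp only [← he]
  by_cases hs : PySem.List.pyGetD line 2 0 = 0
  · rw [if_pos hs, hset, getD_set ls K i _ 0 (by omega)]
    simp only [hs, if_true]
  · rw [if_neg hs, hget, hset, getD_set ls K i _ 0 (by omega)]
    simp only [hs, if_false]

-- one backward iteration of B commutes with one forward iteration of A through combineB
lemma step_inv (line : List Int) (n : Nat)
    (he1 : -(n : Int) ≤ PySem.List.pyGetD line 1 0)
    (he2 : PySem.List.pyGetD line 1 0 < (n : Int))
    (st : List Int × List Int × List Bool) (ls : List Int)
    (h1 : st.1.length = n) (h2 : st.2.1.length = n) (h3 : st.2.2.length = n)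
    (hls : ls.length = n) :
    ∀ i : Nat, i < n → combineB (jugdeStepB st line) ls i = combineB st (jugdeStepA ls line) i := by
  obtain ⟨acc, sign, done⟩ := st
  simp only at h1 h2 h3
  intro i hi
  set e := PySem.List.pyGetD line 1 0 with he
  set K : Nat := (if e < 0 then e + n else e).toNat with hK
  have hKn : K < n := by rw [hK]; split_ifs <;> omega
  have hget : ∀ {α : Type} (xs : List α) (d : α), xs.length = n →
      PySem.List.pyGetD xs e d = xs.getD K d := by
    intro α xs d hx
    rw [pyGetD_inRange xs e d (by omega) (by omega), hx]
  have hset : ∀ {α : Type} (xs : List α) (v : α), xs.length = n →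
      PySem.List.pySetD xs e v = xs.set K v := by
    intro α xs v hx
    rw [pySetD_inRange xs e v (by omega) (by omega), hx]
  have hA := stepA_getD line n he1 he2 ls hls i
  rw [← he, ← hK] at hA
  unfold jugdeStepB combineB
  simp only [← he]
  rw [hget done false h3, hget acc 0 h1, hget sign 0 h2]
  by_cases hdone : done.getD K false = true
  · rw [if_pos hdone]
    simp only [hA]
    by_cases hik : i = K
    · subst hik; rw [if_pos hdone, if_pos hdone]
    · rw [if_neg hik]
  · rw [if_neg hdone]
    by_cases hs : PySem.List.pyGetD line 2 0 = 0
    · rw [if_pos hs]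
      simp only [hA, hs, if_true]
      rw [hset acc _ h1, hset done _ h3,
        getD_set acc K i _ 0 (by omega), getD_set done K i _ false (by omega)]
      by_cases hik : i = K
      · subst hik
        rw [if_pos rfl, if_pos rfl, if_pos rfl, if_pos rfl, if_neg hdone]
        ring
      · rw [if_neg hik, if_neg hik, if_neg hik]
    · rw [if_neg hs]
      simp only [hA, hs, if_false]
      rw [hset acc _ h1, hset sign _ h2,
        getD_set acc K i _ 0 (by omega), getD_set sign K i _ 0 (by omega)]
      by_cases hik : i = K
      · subst hik
        rw [if_pos rfl, if_pos rfl, if_pos rfl, if_neg hdone, if_neg hdone]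
        ring
      · rw [if_neg hik, if_neg hik, if_neg hik]

-- the whole backward loop of B equals the whole forward loop of A through combineB
lemma fold_inv (cs : List (List Int)) (n : Nat)
    (hpre : ∀ line ∈ cs, -(n : Int) ≤ PySem.List.pyGetD line 1 0 ∧
      PySem.List.pyGetD line 1 0 < (n : Int))
    (st : List Int × List Int × List Bool) (ls : List Int)
    (h1 : st.1.length = n) (h2 : st.2.1.length = n) (h3 : st.2.2.length = n)
    (hls : ls.length = n) :
    ∀ i : Nat, i < n →
      combineB (cs.reverse.foldl jugdeStepB st) ls i = combineB st (cs.foldl jugdeStepA ls) i := by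
  induction cs using List.reverseRecOn generalizing st with
  | nil => exact fun i _ => rfl
  | append_singleton ys y ih =>
    obtain ⟨he1, he2⟩ := hpre y (by simp)
    have hpre' : ∀ line ∈ ys, -(n : Int) ≤ PySem.List.pyGetD line 1 0 ∧
        PySem.List.pyGetD line 1 0 < (n : Int) := fun l hl => hpre l (by simp [hl])
    have hlsA : (ys.foldl jugdeStepA ls).length = n := by rw [foldA_length, hls]
    have hlen := stepB_length st y
    intro i hi
    rw [List.reverse_append]
    simp only [List.reverse_singleton, List.singleton_append, List.foldl_cons, List.foldl_append]
    rw [ih hpre' (jugdeStepB st y) (by rw [hlen.1, h1]) (by rw [hlen.2.1, h2])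
        (by rw [hlen.2.2, h3]) i hi,
      step_inv y n he1 he2 st (ys.foldl jugdeStepA ls) h1 h2 h3 hlsA i hi]
    simp only [List.foldl_nil]

-- B's whole loop preserves the acc length
lemma foldB_length (cs : List (List Int)) (st : List Int × List Int × List Bool) :
    (cs.foldl jugdeStepB st).1.length = st.1.length := by
  induction cs generalizing st with
  | nil => rfl
  | cons line rest ih => rw [List.foldl_cons, ih, (stepB_length st line).1]

lemma pyGetD_append_left (l : List Int) (y : Int) (i : Int) (h0 : 0 ≤ i) (h : i < (l.length : Int)) :
    PySem.List.pyGetD (l ++ [y]) i 0 = PySem.List.pyGetD l i 0 := by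
  rw [PySem.List.pyGetD_eq_getElem (l ++ [y]) 0 h0 (by simp; omega),
      PySem.List.pyGetD_eq_getElem l 0 h0 (by omega)]
  exact List.getElem_append_left (by omega)

-- the single-pass strict-greater scan computes (the max, first index of the max)
lemma argmax_scan (x : Int) (xs : List Int) (g : Int → Int)
    (hg : ∀ i : Int, 1 ≤ i → i < (xs.length : Int) + 1 → g i = PySem.List.pyGetD (x :: xs) i 0) :
    (PySem.List.pyRange 1 ((xs.length : Int) + 1) 1).foldl
      (fun (st : Int × Int) i => if g i > st.1 then (g i, i) else st) (x, 0)
    = (xs.foldl max x, (((PySem.List.index? (x :: xs) (xs.foldl max x)).getD 0 : Nat) : Int)) := by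
  induction xs using List.reverseRecOn with
  | nil =>
    rw [show ((([] : List Int).length : Int) + 1) = 1 by simp,
        PySem.List.pyRange_one_eq_nil (le_refl 1)]
    simp
  | append_singleton ys y ih =>
    have hLcast : (((ys ++ [y]).length : Int)) = (ys.length : Int) + 1 := by simp
    set L : Int := (ys.length : Int) + 1 with hL
    have hsplit : PySem.List.pyRange 1 (L + 1) 1 = PySem.List.pyRange 1 L 1 ++ [L] :=
      PySem.List.pyRange_one_succ_right (by omega)
    have hcons : x :: (ys ++ [y]) = (x :: ys) ++ [y] := by simp
    have hg' : ∀ i : Int, 1 ≤ i → i < L → g i = PySem.List.pyGetD (x :: ys) i 0 := by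
      intro i h1 h2
      rw [hg i h1 (by rw [hLcast]; omega), hcons,
          pyGetD_append_left (x :: ys) y i (by omega) (by simp only [List.length_cons]; omega)]
    have hlast : g L = y := by
      rw [hg L (by omega) (by rw [hLcast]; omega), hcons]
      rw [PySem.List.pyGetD_eq_getElem ((x :: ys) ++ [y]) 0 (by omega)
        (by simp only [List.length_append, List.length_cons, List.length_nil]; push_cast; omega)]
      have : L.toNat = (x :: ys).length := by simp [hL]
      exact List.getElem_concat_length this _
    have hM := PySem.List.le_foldl_max ys x
    set M : Int := ys.foldl max x with hMdef
    have hfold : (ys ++ [y]).foldl max x = max M y := by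
      rw [List.foldl_append]
      simp only [List.foldl_cons, List.foldl_nil]
      rw [hMdef]
    rw [hLcast, hsplit, List.foldl_append, ih hg']
    simp only [List.foldl_cons, List.foldl_nil, hlast]
    by_cases hgt : y > M
    · rw [if_pos hgt, hfold, max_eq_right (le_of_lt hgt)]
      have hnotmem : y ∉ (x :: ys) := by
        intro hmem
        rcases List.mem_cons.mp hmem with h | h
        · omega
        · have := hM.2 y h; omega
      rw [hcons, PySem.List.index?_append_singleton_self (x :: ys) y hnotmem]
      simp [hL]
    · rw [if_neg hgt, hfold, max_eq_left (by omega)]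
      have hmem : M ∈ (x :: ys) := by
        rcases PySem.List.foldl_max_mem ys x with h | h
        · rw [hMdef, h]; exact List.mem_cons_self
        · exact List.mem_cons_of_mem _ h
      rw [hcons, PySem.List.index?_append_of_mem [y] hmem]

-- assembly: on Pre_, A's max-then-index over its list equals B's backward scan plus argmax pass
lemma jugde_eq_alt (case : List (List Int)) (hpre : Pre_jugde case) : jugde case = jugde_alt case := by
  set N : Nat := case.length / 2 + 1 with hN
  have hfd : PySem.Int.floordiv (case.length : Int) 2 + 1 = (N : Int) := by
    have := PySem.Int.floordiv_natCast case.length 2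
    rw [hN]; push_cast at this ⊢; omega
  have hrep : ∀ (α : Type) (a : α), PySem.List.pyRepeat [a] ((N : Nat) : Int)
      = List.replicate N a := by
    intro α a; rw [PySem.List.pyRepeat_singleton]; simp
  have hrel := fold_inv case N
    (by intro line hl; exact ⟨(hpre line hl).2.1, (hpre line hl).2.2⟩)
    (List.replicate N 0, List.replicate N 1, List.replicate N false)
    (List.replicate N 0) (by simp) (by simp) (by simp) (by simp)
  set stF := case.reverse.foldl jugdeStepB
    (List.replicate N (0 : Int), List.replicate N (1 : Int), List.replicate N false) with hstF
  set lsA := case.foldl jugdeStepA (List.replicate N (0 : Int)) with hlsA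
  have hlenA : lsA.length = N := by rw [hlsA, foldA_length]; simp
  have hlenB : stF.1.length = N := by rw [hstF, foldB_length]; simp
  -- combineB at the end: acc[i] (zeros on the B side) versus lsA[i] (initial state on the A side)
  have hacc : ∀ i : Nat, i < N → stF.1.getD i 0 = lsA.getD i 0 := by
    intro i hi
    have h := hrel i hi
    unfold combineB at h
    simp [List.getD, hi] at h
    simpa [List.getD] using h
  cases hcc : lsA with
  | nil => rw [hcc] at hlenA; simp [hN] at hlenA
  | cons x xs =>
    have hxslen : ((xs.length : Int)) + 1 = (N : Int) := by
      rw [hcc] at hlenA; simp at hlenA; omega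
    have hgetAcc : ∀ i : Int, 0 ≤ i → i < (N : Int) →
        PySem.List.pyGetD stF.1 i 0 = PySem.List.pyGetD (x :: xs) i 0 := by
      intro i h0 hiN
      rw [PySem.List.pyGetD_eq_getElem stF.1 0 h0 (by rw [hlenB]; omega),
          PySem.List.pyGetD_eq_getElem (x :: xs) 0 h0
            (by simp only [List.length_cons]; omega)]
      have h1 := hacc i.toNat (by omega)
      rw [hcc] at h1
      rw [List.getD_eq_getElem stF.1 0 (by rw [hlenB]; omega),
          List.getD_eq_getElem (x :: xs) 0 (by simp only [List.length_cons]; omega)] at h1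
      exact h1
    have hB : jugde_alt case
        = ((((PySem.List.index? (x :: xs) (xs.foldl max x)).getD 0 : Nat) : Int)) := by
      unfold jugde_alt
      simp only [hfd, hrep, ← hstF]
      have hinit : PySem.List.pyGetD stF.1 0 0 = x := by
        rw [hgetAcc 0 (by omega) (by omega)]
        simp [PySem.List.pyGetD_zero_cons]
      have hscan := argmax_scan x xs (fun i => PySem.List.pyGetD stF.1 i 0)
        (fun i h1 h2 => hgetAcc i (by omega) (by omega))
      rw [hxslen] at hscan
      rw [hinit, hscan]
    have hA : jugde case = ((((PySem.List.index? (x :: xs) (xs.foldl max x)).getD 0 : Nat) : Int)) := by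
      unfold jugde
      simp only [hfd, hrep, ← hlsA, hcc, PySem.List.max?_id_cons]
    rw [hA, hB]

-- ===== VERDICT (by name: the statement is the Claim_ definition above) =====
theorem jugde_spec : Claim_equal_jugde := by
  intro case _ hpre
  exact jugde_eq_alt case hpre
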